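-- pv_equiv track=rewrite | github.com/jskim7018/leetcode_study | algorithm_study/2025/12/20251225/medium/LC_2075.py | decodeCiphertext
-- ===== SOURCE A (Python) =====
-- def decodeCiphertext(encodedText: str, rows: int) -> str:
--     m = rows
--     n = len(encodedText) // m
--
--     ans = ''
--
--     for j in range(n):
--         curr_i = 0
--         curr_j = j
--         while curr_i < m and curr_j < n:
--             ans += encodedText[curr_j+(curr_i*n)]
--             curr_i += 1
--             curr_j += 1
--
--     return ans.rstrip(' ')
-- ===== SOURCE B (Python) =====
-- def decodeCiphertext(encodedText: str, rows: int) -> str: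
--     m = rows
--     n = len(encodedText) // m
--     return ''.join(encodedText[j::n + 1][:min(m, n - j)] for j in range(n)).rstrip(' ')
-- ===== Notes on version B (the rewrite author's own statement) =====
-- stated objective: idiomatic
-- what changed: A walks each diagonal with an explicit inner while-loop maintaining (curr_i, curr_j) index state and builds the answer by repeated string concatenation; B extracts each diagonal as the strided slice encodedText[j::n+1] truncated to min(m, n-j) and joins the slices with ''.join.
import Mathlib
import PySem

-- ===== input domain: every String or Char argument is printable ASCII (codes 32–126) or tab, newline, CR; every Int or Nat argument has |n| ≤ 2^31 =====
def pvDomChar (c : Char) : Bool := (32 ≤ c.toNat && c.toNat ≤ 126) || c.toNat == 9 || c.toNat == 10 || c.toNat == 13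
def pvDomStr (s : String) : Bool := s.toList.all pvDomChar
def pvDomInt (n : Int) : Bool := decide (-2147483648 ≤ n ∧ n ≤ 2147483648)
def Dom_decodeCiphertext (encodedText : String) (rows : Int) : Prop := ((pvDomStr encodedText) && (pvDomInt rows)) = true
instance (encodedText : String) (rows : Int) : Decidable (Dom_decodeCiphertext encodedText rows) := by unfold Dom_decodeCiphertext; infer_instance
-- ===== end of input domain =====

-- B replaces A's explicit index-walking inner while-loop by extracting each diagonal as the
-- strided slice encodedText[j::n+1] truncated to min(m, n-j), joined in column order (idiomatic).

-- ===== PORT A =====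
-- exact port of Python's s.rstrip(' '): drop trailing ' ' characters (only spaces, not other whitespace)
def pvRstripSpace (cs : List Char) : List Char := (cs.reverse.dropWhile (fun c => c == ' ')).reverse

-- the inner 'while curr_i < m and curr_j < n' loop; under Pre_ the index j + i*n is always in
-- range (an IndexError is unreachable), so the pyGetD default is never read
def pvWhileA (chars : List Char) (m n : Int) (i j : Int) (ans : List Char) : List Char :=
  if _h : i < m ∧ j < n then
    pvWhileA chars m n (i + 1) (j + 1) (ans ++ [PySem.List.pyGetD chars (j + i * n) ' '])
  else ans
termination_by (m - i).toNat
decreasing_by omega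

def decodeCiphertext (encodedText : String) (rows : Int) : String :=
  let chars := encodedText.toList
  let m := rows
  let n := PySem.Int.floordiv (chars.length : Int) m
  let ans := (PySem.List.pyRange 0 n 1).foldl (fun acc j => pvWhileA chars m n 0 j acc) []
  String.ofList (pvRstripSpace ans)

-- ===== PORT B =====
def decodeCiphertext_alt (encodedText : String) (rows : Int) : String :=
  let chars := encodedText.toList
  let m := rows
  let n := PySem.Int.floordiv (chars.length : Int) m
  -- encodedText[j::n+1][:min(m, n-j)] for j in range(n); the slice? default is unreachable
  -- (step n+1 ≥ 2 whenever range(n) is nonempty)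
  let pieces := (PySem.List.pyRange 0 n 1).map (fun j =>
      PySem.List.slice ((PySem.List.slice? chars (some j) none (n + 1)).getD []) none (some (min m (n - j))))
  String.ofList (pvRstripSpace (PySem.Chars.join [] pieces))

-- ===== PRECONDITION & SPEC =====
-- Pre_ excludes exactly rows = 0, where Python A raises ZeroDivisionError (B raises there too)
def Pre_decodeCiphertext (encodedText : String) (rows : Int) : Prop := rows ≠ 0
instance (encodedText : String) (rows : Int) : Decidable (Pre_decodeCiphertext encodedText rows) := by unfold Pre_decodeCiphertext; infer_instance
def pvWitness_decodeCiphertext : String × Int := ("ch   ie  pr", 3)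

def Spec_decodeCiphertext (encodedText : String) (rows : Int) (out : String) : Prop := out = decodeCiphertext_alt encodedText rows
instance (encodedText : String) (rows : Int) (out : String) : Decidable (Spec_decodeCiphertext encodedText rows out) := by unfold Spec_decodeCiphertext; infer_instance

-- ===== CLAIM (what is proved, stated in full; the proofs are below) =====
def Claim_equal_decodeCiphertext : Prop := ∀ (encodedText : String) (rows : Int), Dom_decodeCiphertext encodedText rows → Pre_decodeCiphertext encodedText rows → Spec_decodeCiphertext encodedText rows (decodeCiphertext encodedText rows)

-- ===== LEMMAS AND PROOFS =====

-- the inner loop only appends to its accumulator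
lemma pvWhileA_acc (chars : List Char) (m n : Int) :
    ∀ (k : Nat) (i j : Int) (acc : List Char), k = (m - i).toNat →
      pvWhileA chars m n i j acc = acc ++ pvWhileA chars m n i j [] := by
  intro k
  induction k with
  | zero =>
    intro i j acc hk
    have hc : ¬ (i < m ∧ j < n) := by omega
    have e : ∀ acc' : List Char, pvWhileA chars m n i j acc' = acc' := by
      intro acc'; rw [pvWhileA]; simp [hc]
    rw [e, e]; simp
  | succ k ih =>
    intro i j acc hk
    by_cases hc : i < m ∧ j < n
    · have e : ∀ acc' : List Char, pvWhileA chars m n i j acc' =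
          pvWhileA chars m n (i + 1) (j + 1) (acc' ++ [PySem.List.pyGetD chars (j + i * n) ' ']) := by
        intro acc'; rw [pvWhileA]; simp [hc]
      rw [e acc, e []]
      rw [ih (i + 1) (j + 1) (acc ++ _) (by omega), ih (i + 1) (j + 1) ([] ++ _) (by omega)]
      simp
    · have e : ∀ acc' : List Char, pvWhileA chars m n i j acc' = acc' := by
        intro acc'; rw [pvWhileA]; simp [hc]
      rw [e, e]; simp

-- the inner loop, started at (i, j), walks the diagonal indices
lemma pvWhileA_eq_map (chars : List Char) (m n : Int) :
    ∀ (k : Nat) (i j : Int), k = (min (m - i) (n - j)).toNat →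
      pvWhileA chars m n i j [] =
        (List.range k).map (fun t : Nat => PySem.List.pyGetD chars ((j + (t : Int)) + (i + (t : Int)) * n) ' ') := by
  intro k
  induction k with
  | zero =>
    intro i j hk
    have hc : ¬ (i < m ∧ j < n) := by omega
    rw [pvWhileA]; simp [hc]
  | succ k ih =>
    intro i j hk
    have hc : i < m ∧ j < n := by omega
    rw [pvWhileA]
    simp only [hc, and_self, dif_pos]
    rw [pvWhileA_acc chars m n (m - (i + 1)).toNat (i + 1) (j + 1) _ rfl]
    rw [ih (i + 1) (j + 1) (by omega)]
    rw [List.range_succ_eq_map, List.map_cons, List.map_map, List.nil_append,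
      List.singleton_append]
    refine List.cons_eq_cons.mpr ⟨?_, ?_⟩
    · congr 1; push_cast; ring
    · apply List.map_congr_left; intro t ht
      simp only [Function.comp]; congr 1; push_cast; ring

-- a filterMap over a list on which every value is some is a map of the defaulted values
lemma filterMap_eq_map_getD {α β : Type} (l : List α) (g : α → Option β) (d : β)
    (h : ∀ x ∈ l, (g x).isSome) :
    l.filterMap g = l.map (fun x => (g x).getD d) := by
  induction l with
  | nil => simp
  | cons a l ih =>
    have ha := h a (by simp)
    rcases Option.isSome_iff_exists.mp ha with ⟨b, hb⟩
    simp [hb, ih (fun x hx => h x (by simp [hx]))]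

-- ''.join is flatten
lemma join_nil_sep (ps : List (List Char)) : PySem.Chars.join [] ps = ps.flatten := by
  show List.intercalate [] ps = ps.flatten
  induction ps with
  | nil => rfl
  | cons a ps ih => cases ps <;> simp_all [List.intercalate]

-- B's piece for column j equals the canonical diagonal map
lemma pieceB_eq_map (chars : List Char) (m n j : Int)
    (hm : 0 < m) (hj0 : 0 ≤ j) (hjn : j < n) (hmn : n * m ≤ (chars.length : Int)) :
    PySem.List.slice ((PySem.List.slice? chars (some j) none (n + 1)).getD []) none (some (min m (n - j))) =
      (List.range ((min m (n - j)).toNat)).map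
        (fun t : Nat => PySem.List.pyGetD chars ((j + (t : Int)) + (t : Int) * n) ' ') := by
  have hL0 : (0 : Int) ≤ (chars.length : Int) := by positivity
  have hnL : n ≤ (chars.length : Int) := by nlinarith
  have hjL : j < (chars.length : Int) := lt_of_lt_of_le hjn hnL
  set L : Int := (chars.length : Int) with hLdef
  have hstep : (0 : Int) < n + 1 := by omega
  -- unfold the strided slice
  simp only [PySem.List.slice?, PySem.List.sliceIndices, if_neg (by omega : ¬ (n + 1 = 0)),
    if_neg (by omega : ¬ (n + 1 < 0)), if_neg (by omega : ¬ (j < 0)), if_pos hstep, ← hLdef,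
    min_eq_left (by omega : j ≤ L), if_pos hjL, Option.getD_some]
  set q : Int := (L - j + (n + 1) - 1) / (n + 1) with hqdef
  have hdiv := Int.mul_ediv_add_emod (L - j + (n + 1) - 1) (n + 1)
  have hr0 := Int.emod_nonneg (L - j + (n + 1) - 1) (by omega : (n + 1) ≠ 0)
  have hrlt := Int.emod_lt_of_pos (L - j + (n + 1) - 1) hstep
  -- every index produced by the slice is in range
  have hrange : ∀ x ∈ List.range q.toNat, (chars[(j + (n + 1) * (x : Int)).toNat]?).isSome := by
    intro x hx
    rw [List.mem_range] at hx
    have hxq : (x : Int) ≤ q - 1 := by omega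
    have : (n + 1) * (x : Int) ≤ (n + 1) * (q - 1) :=
      mul_le_mul_of_nonneg_left hxq (by omega)
    have hidx : j + (n + 1) * (x : Int) < L := by nlinarith
    have hlt : (j + (n + 1) * (x : Int)).toNat < chars.length := by omega
    rw [List.getElem?_eq_getElem hlt]; rfl
  rw [filterMap_eq_map_getD _ _ ' ' hrange]
  -- unfold the truncating slice
  set v : Int := min m (n - j) with hvdef
  have hv1 : 1 ≤ v := by omega
  have hvq : v ≤ q := by
    rw [hqdef, Int.le_ediv_iff_mul_le hstep]
    have h1 : v * n ≤ m * n := mul_le_mul_of_nonneg_right (by omega) (by omega)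
    have h2 : v * (n + 1) = v * n + v := by ring
    have h3 : n * m = m * n := mul_comm n m
    linarith [h1, h2, h3, hmn, (by omega : v ≤ n - j)]
  simp only [PySem.List.slice, PySem.List.clampIdx, if_neg (by omega : ¬ (v < 0)),
    List.length_map, List.length_range, List.drop_zero, Nat.sub_zero]
  rw [min_eq_left (by omega : v.toNat ≤ q.toNat), ← List.map_take, List.take_range,
    Nat.min_eq_left (by omega : v.toNat ≤ q.toNat)]
  apply List.map_congr_left; intro t ht
  rw [PySem.List.pyGetD_of_nonneg _ _
    (add_nonneg (add_nonneg hj0 (Int.natCast_nonneg t)) (mul_nonneg (Int.natCast_nonneg t) (by omega))),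
    List.getD_eq_getElem?_getD]
  congr 2
  have : (j + (n + 1) * (t : Int)) = ((j + t) + (t : Int) * n) := by ring
  rw [this]

-- ===== VERDICT (by name: the statement is the Claim_ definition above) =====
theorem decodeCiphertext_spec : Claim_equal_decodeCiphertext := by
  intro s rows _ hpre
  unfold Spec_decodeCiphertext decodeCiphertext decodeCiphertext_alt
  dsimp only
  set chars := s.toList with hchars
  set n : Int := PySem.Int.floordiv ((chars.length : Int)) rows with hndef
  have hL0 : (0 : Int) ≤ (chars.length : Int) := by positivity
  have hfm : n * rows + PySem.Int.mod (chars.length : Int) rows = (chars.length : Int) := by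
    rw [hndef]; exact PySem.Int.floordiv_mul_add_mod _ _
  rcases lt_trichotomy rows 0 with hr | hr | hr
  · -- rows < 0: n ≤ 0, both loops are empty
    have hmb := PySem.Int.mod_neg_bounds (chars.length : Int) hr
    have hn0 : n ≤ 0 := by
      by_contra hn
      push_neg at hn
      have h1 : n * rows ≤ 1 * rows := mul_le_mul_of_nonpos_right (by omega) (le_of_lt hr)
      rw [one_mul] at h1
      linarith [hmb.2]
    have hempty : PySem.List.pyRange 0 n 1 = [] := by
      rw [PySem.List.pyRange_of_pos 0 n (by norm_num), if_neg (by omega : ¬ (0 : Int) < n)]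
      simp
    rw [hempty]
    simp
  · exact absurd hr hpre
  · -- rows > 0
    have hm0 := PySem.Int.mod_nonneg (chars.length : Int) hr
    have hmlt := PySem.Int.mod_lt (chars.length : Int) hr
    have hn0 : 0 ≤ n := by
      by_contra hn
      push_neg at hn
      have h1 : n * rows ≤ (-1) * rows := mul_le_mul_of_nonneg_right (by omega) (le_of_lt hr)
      linarith
    have hmn : n * rows ≤ (chars.length : Int) := by linarith
    congr 1
    congr 1
    rw [join_nil_sep]
    have hfun : (fun (acc : List Char) j => pvWhileA chars rows n 0 j acc) =
        (fun acc j => acc ++ pvWhileA chars rows n 0 j []) := by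
      funext acc j
      exact pvWhileA_acc chars rows n (rows - 0).toNat 0 j acc (by omega)
    rw [hfun, PySem.List.foldl_append_eq_flatMap, List.nil_append, List.flatMap_def]
    congr 1
    apply List.map_congr_left; intro j hj
    rw [PySem.List.mem_pyRange_one] at hj
    rw [pvWhileA_eq_map chars rows n ((min rows (n - j)).toNat) 0 j (by omega),
      pieceB_eq_map chars rows n j hr hj.1 hj.2 hmn]
    apply List.map_congr_left; intro t ht
    congr 1; ring
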